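-- pv_equiv track=rewrite | github.com/djoshuac/competitive-programming | hackerrank/Week_Of_Code/34/B-Maximum_gcd_and_sum/brute.py | maximum_gcd_sum_brute
-- ===== SOURCE A (Python) =====
-- def gcd(a, b):
--     a, b = (b, a) if a < b else (a, b)
--     while b != 0:
--         a %= b
--         a, b = b, a
--     return a
--
-- def maximum_gcd_sum_brute(A, B):
--     gs = (0, 0)
--     for a in A:
--         for b in B:
--             ab = (gcd(a, b), a + b)
--             if ab[0] > gs[0]:
--                 gs = ab
--             elif ab[0] == gs[0] and ab[1] > gs[1]:
--                 gs = ab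
--     return gs[1]
-- ===== SOURCE B (Python) =====
-- # Divisor-indexed re-implementation: instead of gcd over all |A|*|B| pairs,
-- # build per-divisor maxima for the positive elements of each list and scan
-- # the common divisors; pairs involving a negative number can never win
-- # (the original's hand-rolled gcd is negative there), and zeros pair best
-- # with the other list's maximum.
-- def maximum_gcd_sum_brute(A, B):
--     posA = set(x for x in A if x > 0)
--     posB = set(x for x in B if x > 0)
--     dA = _divisor_max(posA)
--     dB = _divisor_max(posB)
--     best = (0, 0)
--     for g, ma in dA.items():
--         mb = dB.get(g)
--         if mb is not None and (g, ma + mb) > best: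
--             best = (g, ma + mb)
--     if 0 in A and posB:
--         pb = max(posB)
--         if (pb, pb) > best:
--             best = (pb, pb)
--     if 0 in B and posA:
--         pa = max(posA)
--         if (pa, pa) > best:
--             best = (pa, pa)
--     return best[1]
--
-- def _divisor_max(xs):
--     d = {}
--     for x in xs:
--         i = 1
--         while i * i <= x:
--             if x % i == 0:
--                 if d.get(i, 0) < x:
--                     d[i] = x
--                 j = x // i
--                 if d.get(j, 0) < x:
--                     d[j] = x
--             i += 1
--     return d
-- ===== Notes on version B (the rewrite author's own statement) =====
-- stated objective: faster
-- what changed: Instead of computing gcd for every pair in A x B, B enumerates the divisors of each positive element once (sqrt loop) into per-list dicts mapping divisor -> largest multiple, takes the lexicographic max of (g, maxA[g]+maxB[g]) over common divisors, and handles zeros explicitly (pairs with a negative element never win because A's hand-rolled gcd is negative there).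
import Mathlib
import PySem

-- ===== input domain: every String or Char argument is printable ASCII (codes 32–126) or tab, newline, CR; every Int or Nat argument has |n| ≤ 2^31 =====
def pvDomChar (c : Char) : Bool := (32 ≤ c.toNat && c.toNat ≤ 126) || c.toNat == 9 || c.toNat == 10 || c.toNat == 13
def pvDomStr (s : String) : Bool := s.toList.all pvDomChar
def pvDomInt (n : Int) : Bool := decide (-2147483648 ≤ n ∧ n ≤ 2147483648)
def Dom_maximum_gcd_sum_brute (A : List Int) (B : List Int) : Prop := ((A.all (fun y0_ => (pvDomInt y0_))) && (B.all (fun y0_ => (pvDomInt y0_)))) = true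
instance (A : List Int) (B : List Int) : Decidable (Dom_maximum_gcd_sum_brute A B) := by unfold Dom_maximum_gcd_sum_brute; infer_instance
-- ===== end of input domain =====

-- B replaces the gcd-per-pair double loop by per-divisor maxima of the positive
-- elements (sqrt-divisor enumeration into a dict) plus explicit handling of zeros;
-- pairs containing a negative element never win because A's hand-rolled gcd is
-- negative there. Equivalence is proved for ALL integer lists (no Pre_ needed).

-- ===== PORT A =====
-- termination helper for the while-loop of A's gcd (cited by decreasing_by)
theorem pvModAbsLt (a b : Int) (hb : ¬ b = 0) : (PySem.Int.mod a b).natAbs < b.natAbs := by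
  rcases lt_or_gt_of_ne hb with h | h
  · have h1 := PySem.Int.mod_neg_bounds a h
    omega
  · have h1 := PySem.Int.mod_nonneg a h
    have h2 := PySem.Int.mod_lt a h
    omega

-- 'while b != 0: a %= b; a, b = b, a; return a'
def pyGcdLoop (a b : Int) : Int :=
  if hb : b ≠ 0 then pyGcdLoop b (PySem.Int.mod a b) else a
termination_by b.natAbs
decreasing_by exact pvModAbsLt a b hb

-- 'a, b = (b, a) if a < b else (a, b)' then the loop
def pyGcd (a b : Int) : Int :=
  if a < b then pyGcdLoop b a else pyGcdLoop a b

def maximum_gcd_sum_brute (A : List Int) (B : List Int) : Int :=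
  (A.foldl (fun gs a =>
    B.foldl (fun gs b =>
      let ab : Int × Int := (pyGcd a b, a + b)
      if ab.1 > gs.1 then ab
      else if ab.1 = gs.1 ∧ ab.2 > gs.2 then ab
      else gs) gs) ((0 : Int), (0 : Int))).2

-- ===== PORT B =====
-- inner while loop of _divisor_max: 'while i*i <= x: if x % i == 0: …; i += 1'
def pvDivLoop (x i : Int) (d : PySem.Dict Int Int) : PySem.Dict Int Int :=
  if h : i * i ≤ x then
    let d1 :=
      if PySem.Int.mod x i = 0 then
        let d' := if d.getD i 0 < x then d.insert i x else d
        let j := PySem.Int.floordiv x i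
        if d'.getD j 0 < x then d'.insert j x else d'
      else d
    pvDivLoop x (i + 1) d1
  else d
termination_by (x + 1 - i).toNat
decreasing_by
  have hix : i ≤ x := by nlinarith [sq_nonneg i, sq_nonneg (i - 1)]
  omega

def pvDivisorMax (xs : List Int) : PySem.Dict Int Int :=
  xs.foldl (fun d x => pvDivLoop x 1 d) PySem.Dict.empty

def maximum_gcd_sum_brute_alt (A : List Int) (B : List Int) : Int :=
  let posA : PySem.Set Int := PySem.Set.ofList (A.filter (fun x => decide (0 < x)))
  let posB : PySem.Set Int := PySem.Set.ofList (B.filter (fun x => decide (0 < x)))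
  let dA := pvDivisorMax posA
  let dB := pvDivisorMax posB
  let best := dA.items.foldl (fun best p =>
    match dB.get? p.1 with
    | some mb =>
        if p.1 > best.1 ∨ (p.1 = best.1 ∧ p.2 + mb > best.2) then (p.1, p.2 + mb) else best
    | none => best) ((0 : Int), (0 : Int))
  let best :=
    if (0 : Int) ∈ A ∧ posB ≠ [] then
      let pb := (PySem.List.max? posB (fun y => y)).getD 0
      if pb > best.1 ∨ (pb = best.1 ∧ pb > best.2) then (pb, pb) else best
    else best
  let best :=
    if (0 : Int) ∈ B ∧ posA ≠ [] then
      let pa := (PySem.List.max? posA (fun y => y)).getD 0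
      if pa > best.1 ∨ (pa = best.1 ∧ pa > best.2) then (pa, pa) else best
    else best
  best.2

-- ===== PRECONDITION & SPEC =====
def Spec_maximum_gcd_sum_brute (A : List Int) (B : List Int) (out : Int) : Prop := out = maximum_gcd_sum_brute_alt A B
instance (A : List Int) (B : List Int) (out : Int) : Decidable (Spec_maximum_gcd_sum_brute A B out) := by unfold Spec_maximum_gcd_sum_brute; infer_instance

-- ===== CLAIM (what is proved, stated in full; the proofs are below) =====
def Claim_equal_maximum_gcd_sum_brute : Prop := ∀ (A : List Int) (B : List Int), Dom_maximum_gcd_sum_brute A B → Spec_maximum_gcd_sum_brute A B (maximum_gcd_sum_brute A B)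

-- ===== LEMMAS AND PROOFS =====

-- lexicographic strict-less and max (Python tuple comparison on (gcd, sum))
def pvLe2 (p q : Int × Int) : Prop := p.1 < q.1 ∨ (p.1 = q.1 ∧ p.2 ≤ q.2)

def pvMax2 (p q : Int × Int) : Int × Int :=
  if q.1 > p.1 ∨ (q.1 = p.1 ∧ q.2 > p.2) then q else p

theorem pvLe2_refl (p : Int × Int) : pvLe2 p p := by unfold pvLe2; omega

theorem pvLe2_trans {p q r : Int × Int} (h1 : pvLe2 p q) (h2 : pvLe2 q r) : pvLe2 p r := by
  unfold pvLe2 at *; omega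

theorem pvLe2_antisymm {p q : Int × Int} (h1 : pvLe2 p q) (h2 : pvLe2 q p) : p = q := by
  unfold pvLe2 at *
  obtain ⟨a, b⟩ := p; obtain ⟨c, d⟩ := q
  simp_all; omega

theorem pvLe2_left (p q : Int × Int) : pvLe2 p (pvMax2 p q) := by
  unfold pvLe2 pvMax2; split_ifs <;> omega

theorem pvLe2_right (p q : Int × Int) : pvLe2 q (pvMax2 p q) := by
  unfold pvLe2 pvMax2; split_ifs <;> omega

theorem pvMax2_cases (p q : Int × Int) : pvMax2 p q = p ∨ pvMax2 p q = q := by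
  unfold pvMax2; split_ifs <;> simp

theorem pvFold_ge_init (L : List (Int × Int)) (z : Int × Int) :
    pvLe2 z (L.foldl pvMax2 z) := by
  induction L generalizing z with
  | nil => exact pvLe2_refl z
  | cons x t ih => exact pvLe2_trans (pvLe2_left z x) (ih (pvMax2 z x))

theorem pvFold_ge_mem (L : List (Int × Int)) (z x : Int × Int) (hx : x ∈ L) :
    pvLe2 x (L.foldl pvMax2 z) := by
  induction L generalizing z with
  | nil => cases hx
  | cons y t ih =>
    rcases List.mem_cons.mp hx with h | h
    · subst h; exact pvLe2_trans (pvLe2_right z x) (pvFold_ge_init t (pvMax2 z x))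
    · exact ih (pvMax2 z y) h

theorem pvFold_mem (L : List (Int × Int)) (z : Int × Int) :
    L.foldl pvMax2 z = z ∨ L.foldl pvMax2 z ∈ L := by
  induction L generalizing z with
  | nil => left; rfl
  | cons x t ih =>
    simp only [List.foldl_cons]
    rcases ih (pvMax2 z x) with h | h
    · rcases pvMax2_cases z x with h2 | h2
      · left; rw [h, h2]
      · right; rw [h, h2]; exact List.mem_cons_self
    · right; exact List.mem_cons_of_mem x h

-- the two folds are equal when each list (with the shared seed) is dominated by the other
theorem pvFold_eq (L1 L2 : List (Int × Int)) (z : Int × Int)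
    (h12 : ∀ x ∈ L1, ∃ y, (y = z ∨ y ∈ L2) ∧ pvLe2 x y)
    (h21 : ∀ x ∈ L2, ∃ y, (y = z ∨ y ∈ L1) ∧ pvLe2 x y) :
    L1.foldl pvMax2 z = L2.foldl pvMax2 z := by
  have key : ∀ (P Q : List (Int × Int)),
      (∀ x ∈ P, ∃ y, (y = z ∨ y ∈ Q) ∧ pvLe2 x y) →
      pvLe2 (P.foldl pvMax2 z) (Q.foldl pvMax2 z) := by
    intro P Q h
    rcases pvFold_mem P z with hm | hm
    · rw [hm]; exact pvFold_ge_init Q z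
    · obtain ⟨y, hy, hle⟩ := h _ hm
      rcases hy with h' | hy
      · rw [h'] at hle; exact pvLe2_trans hle (pvFold_ge_init Q z)
      · exact pvLe2_trans hle (pvFold_ge_mem Q z y hy)
  exact pvLe2_antisymm (key L1 L2 h12) (key L2 L1 h21)


-- ----- A-side normalization: the nested loops are a lexicographic running max -----

def pvPairs (A B : List Int) : List (Int × Int) :=
  A.flatMap (fun a => B.map (fun b => (pyGcd a b, a + b)))

theorem pvStep_eq (gs ab : Int × Int) :
    (if ab.1 > gs.1 then ab else if ab.1 = gs.1 ∧ ab.2 > gs.2 then ab else gs) = pvMax2 gs ab := by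
  unfold pvMax2; split_ifs <;> first | rfl | (exfalso; omega)

theorem pvInner (a : Int) (B : List Int) (gs : Int × Int) :
    B.foldl (fun gs b =>
      let ab : Int × Int := (pyGcd a b, a + b)
      if ab.1 > gs.1 then ab else if ab.1 = gs.1 ∧ ab.2 > gs.2 then ab else gs) gs
    = (B.map (fun b => (pyGcd a b, a + b))).foldl pvMax2 gs := by
  induction B generalizing gs with
  | nil => rfl
  | cons b t ih =>
    simp only [List.foldl_cons, List.map_cons]
    rw [show (let ab : Int × Int := (pyGcd a b, a + b);
        if ab.1 > gs.1 then ab else if ab.1 = gs.1 ∧ ab.2 > gs.2 then ab else gs)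
        = pvMax2 gs (pyGcd a b, a + b) from pvStep_eq gs _]
    exact ih _

theorem pvA_eq (A B : List Int) :
    maximum_gcd_sum_brute A B = ((pvPairs A B).foldl pvMax2 ((0 : Int), (0 : Int))).2 := by
  unfold maximum_gcd_sum_brute pvPairs
  rw [List.foldl_flatMap]
  congr 1
  suffices h : ∀ z : Int × Int, A.foldl (fun gs a =>
      List.foldl (fun gs b =>
        let ab : Int × Int := (pyGcd a b, a + b)
        if ab.1 > gs.1 then ab else if ab.1 = gs.1 ∧ ab.2 > gs.2 then ab else gs) gs B) z
      = A.foldl (fun acc a => (B.map (fun b => (pyGcd a b, a + b))).foldl pvMax2 acc) z from h _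
  intro z
  induction A generalizing z with
  | nil => rfl
  | cons a t ih => simp only [List.foldl_cons]; rw [pvInner]; exact ih _

-- ----- A's gcd: equals Int.gcd on nonnegative inputs, negative when an input is negative -----

theorem pyGcdLoop_zero (a : Int) : pyGcdLoop a 0 = a := by
  rw [pyGcdLoop]; simp

theorem pyGcdLoop_eq_gcd (n : Nat) : ∀ a b : Int, b.natAbs ≤ n → 0 ≤ a → 0 ≤ b →
    pyGcdLoop a b = (Int.gcd a b : Int) := by
  induction n with
  | zero =>
    intro a b h ha hb
    have hb0 : b = 0 := by omega
    subst hb0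
    rw [pyGcdLoop_zero]
    simp [Int.gcd, Int.natAbs_of_nonneg ha]
  | succ n ih =>
    intro a b h ha hb
    by_cases hb0 : b = 0
    · subst hb0
      rw [pyGcdLoop_zero]
      simp [Int.gcd, Int.natAbs_of_nonneg ha]
    · have hbpos : 0 < b := by omega
      rw [pyGcdLoop, dif_pos hb0]
      rw [PySem.Int.mod_eq_emod_of_pos hbpos]
      have h1 : (a % b).natAbs ≤ n := by
        have := Int.emod_nonneg a hb0
        have := Int.emod_lt_of_pos a hbpos
        omega
      rw [ih b (a % b) h1 hb (Int.emod_nonneg a hb0)]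
      rw [Int.gcd_comm, Int.gcd_emod]

theorem pyGcd_eq_gcd (a b : Int) (ha : 0 ≤ a) (hb : 0 ≤ b) :
    pyGcd a b = (Int.gcd a b : Int) := by
  unfold pyGcd
  split_ifs with h
  · rw [pyGcdLoop_eq_gcd a.natAbs b a le_rfl hb ha, Int.gcd_comm]
  · exact pyGcdLoop_eq_gcd b.natAbs a b le_rfl ha hb

theorem pyGcdLoop_neg (n : Nat) : ∀ a b : Int, b.natAbs ≤ n → b < 0 → pyGcdLoop a b < 0 := by
  induction n with
  | zero => intro a b h hb; omega
  | succ n ih =>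
    intro a b h hb
    rw [pyGcdLoop, dif_pos (by omega : b ≠ 0)]
    have hm := PySem.Int.mod_neg_bounds a hb
    by_cases hm0 : PySem.Int.mod a b = 0
    · rw [hm0, pyGcdLoop_zero]; exact hb
    · exact ih b (PySem.Int.mod a b) (by omega) (by omega)

theorem pyGcd_neg (a b : Int) (h : a < 0 ∨ b < 0) : pyGcd a b < 0 := by
  unfold pyGcd
  split_ifs with hab
  · exact pyGcdLoop_neg a.natAbs b a le_rfl (by omega)
  · exact pyGcdLoop_neg b.natAbs a b le_rfl (by omega)


-- ----- the divisor while-loop: closed form of the dict it builds -----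

-- divisors the loop 'while j*j <= x' still touches from counter value i on
def pvTouch (x i g : Int) : Bool :=
  decide (g ∣ x) && decide (1 ≤ g) &&
    (decide (i ≤ g ∧ g * g ≤ x) || decide (x ≤ g * g ∧ i ≤ x / g))

theorem pvTouch_iff (x i g : Int) :
    pvTouch x i g = true ↔
      g ∣ x ∧ 1 ≤ g ∧ ((i ≤ g ∧ g * g ≤ x) ∨ (x ≤ g * g ∧ i ≤ x / g)) := by
  simp [pvTouch, and_assoc]

theorem pvIleX (i x : Int) (h : i * i ≤ x) : i ≤ x := by
  rcases (by omega : i ≤ 0 ∨ 1 ≤ i) with h0 | h0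
  · nlinarith
  · nlinarith

theorem pvDivFacts (x g : Int) (hx : 0 < x) (hg : 1 ≤ g) (hdvd : g ∣ x) :
    1 ≤ x / g ∧ (x / g) ∣ x ∧ x / (x / g) = g ∧ x / g * g = x ∧ g ≤ x ∧ x / g ≤ x := by
  have hmul : x / g * g = x := Int.ediv_mul_cancel hdvd
  have hq1 : 1 ≤ x / g := by nlinarith
  have hqdvd : (x / g) ∣ x := Dvd.intro g (by linarith [hmul])
  have hqq : x / (x / g) = g := by
    have hq0 : x / g ≠ 0 := by omega
    calc x / (x / g) = (x / g * g) / (x / g) := by rw [hmul]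
    _ = g := Int.mul_ediv_cancel_left g hq0
  have hgx : g ≤ x := Int.le_of_dvd hx hdvd
  have hqx : x / g ≤ x := Int.le_of_dvd hx hqdvd
  exact ⟨hq1, hqdvd, hqq, hmul, hgx, hqx⟩

theorem pvTouch_sq (x i g : Int) (hx : 0 < x) (hi : 1 ≤ i) (ht : pvTouch x i g = true) :
    i * i ≤ x := by
  rw [pvTouch_iff] at ht
  obtain ⟨hdvd, hg, hcase⟩ := ht
  obtain ⟨hq1, hqdvd, hqq, hmul, hgx, hqx⟩ := pvDivFacts x g hx hg hdvd
  rcases hcase with ⟨h1, h2⟩ | ⟨h1, h2⟩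
  · have e1 : i * i ≤ i * g := by nlinarith
    have e2 : i * g ≤ g * g := by nlinarith
    omega
  · have hqg : x / g ≤ g := by nlinarith
    have e1 : i * i ≤ i * (x / g) := by nlinarith
    have e2 : i * (x / g) ≤ (x / g) * (x / g) := by nlinarith
    have e3 : (x / g) * (x / g) ≤ (x / g) * g := by nlinarith
    omega

theorem pvTouch_one (x g : Int) (hx : 0 < x) :
    pvTouch x 1 g = (decide (g ∣ x) && decide (1 ≤ g)) := by
  rw [Bool.eq_iff_iff, pvTouch_iff]
  simp only [Bool.and_eq_true, decide_eq_true_eq]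
  constructor
  · rintro ⟨h1, h2, _⟩; exact ⟨h1, h2⟩
  · rintro ⟨hdvd, hg⟩
    obtain ⟨hq1, hqdvd, hqq, hmul, hgx, hqx⟩ := pvDivFacts x g hx hg hdvd
    refine ⟨hdvd, hg, ?_⟩
    by_cases hsq : g * g ≤ x
    · left; exact ⟨hg, hsq⟩
    · right; exact ⟨by omega, hq1⟩

-- stepping the touch set: keys other than i and x/i are touched from i iff from i+1
theorem pvTouch_step (x i g : Int) (hx : 0 < x)
    (hside : ¬ (i ∣ x) ∨ (g ≠ i ∧ g ≠ x / i)) :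
    pvTouch x i g = pvTouch x (i + 1) g := by
  rw [Bool.eq_iff_iff, pvTouch_iff, pvTouch_iff]
  constructor
  · rintro ⟨hdvd, hg, hcase⟩
    obtain ⟨hq1, hqdvd, hqq, hmul, hgx, hqx⟩ := pvDivFacts x g hx hg hdvd
    refine ⟨hdvd, hg, ?_⟩
    rcases hcase with ⟨h1, h2⟩ | ⟨h1, h2⟩
    · left
      refine ⟨?_, h2⟩
      rcases eq_or_lt_of_le h1 with he | hlt
      · exfalso
        rcases hside with hnd | ⟨hne, _⟩
        · exact hnd (by rw [he]; exact hdvd)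
        · exact hne he.symm
      · omega
    · right
      refine ⟨h1, ?_⟩
      rcases eq_or_lt_of_le h2 with he | hlt
      · exfalso
        have hgeq : g = x / i := by rw [he]; exact hqq.symm
        rcases hside with hnd | ⟨_, hne⟩
        · exact hnd (by rw [he]; exact hqdvd)
        · exact hne hgeq
      · omega
  · rintro ⟨hdvd, hg, hcase⟩
    refine ⟨hdvd, hg, ?_⟩
    rcases hcase with ⟨h1, h2⟩ | ⟨h1, h2⟩
    · left; exact ⟨by omega, h2⟩
    · right; exact ⟨h1, by omega⟩

-- 'if d.get(k, 0) < x: d[k] = x' keeps the running maximum at key k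
theorem pvUpd (d : PySem.Dict Int Int) (k x g : Int) :
    (if d.getD k 0 < x then d.insert k x else d).getD g 0
      = if g = k then max (d.getD g 0) x else d.getD g 0 := by
  split_ifs with h1 h2 h2
  · rw [PySem.Dict.getD_insert, if_pos h2]; subst h2; omega
  · rw [PySem.Dict.getD_insert, if_neg h2]
  · subst h2; omega
  · rfl

theorem pvDivLoop_getD (x : Int) (hx : 0 < x) : ∀ (n : Nat) (i : Int), (x + 1 - i).toNat ≤ n → 1 ≤ i →
    ∀ (d : PySem.Dict Int Int) (g : Int),
    (pvDivLoop x i d).getD g 0 = if pvTouch x i g then max (d.getD g 0) x else d.getD g 0 := by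
  intro n
  induction n with
  | zero =>
    intro i h hi d g
    have hstop : ¬ i * i ≤ x := by
      intro hlt
      have := pvIleX i x hlt
      omega
    rw [pvDivLoop, dif_neg hstop]
    rw [if_neg (fun ht => hstop (pvTouch_sq x i g hx hi ht))]
  | succ n ih =>
    intro i h hi d g
    by_cases hlt : i * i ≤ x
    · have hile : i ≤ x := pvIleX i x hlt
      rw [pvDivLoop, dif_pos hlt]
      dsimp only
      by_cases hmod : PySem.Int.mod x i = 0
      · have hidvd : i ∣ x := (PySem.Int.mod_eq_zero_iff_dvd x i).mp hmod
        obtain ⟨hq1, hqdvd, hqq, hmul, hgx, hqx⟩ := pvDivFacts x i hx hi hidvd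
        have hfd : PySem.Int.floordiv x i = x / i := PySem.Int.floordiv_eq_ediv_of_pos (by omega)
        rw [if_pos hmod, hfd]
        rw [ih (i + 1) (by omega) (by omega)]
        rw [pvUpd, pvUpd]
        by_cases hgi : g = i
        · have htg : pvTouch x i g = true := by
            rw [pvTouch_iff]; exact ⟨hgi ▸ hidvd, by omega, Or.inl ⟨le_of_eq hgi.symm, hgi ▸ hlt⟩⟩
          rw [if_pos htg]
          split_ifs <;> omega
        · by_cases hgj : g = x / i
          · have hxj : x ≤ (x / i) * (x / i) := by nlinarith
            have htg : pvTouch x i g = true := by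
              rw [pvTouch_iff]
              exact ⟨hgj ▸ hqdvd, by omega, Or.inr ⟨hgj ▸ hxj, by rw [hgj, hqq]⟩⟩
            rw [if_pos htg, if_pos hgj, if_neg hgi]
            split_ifs <;> omega
          · rw [if_neg hgj, if_neg hgi]
            rw [← pvTouch_step x i g hx (Or.inr ⟨hgi, hgj⟩)]
      · rw [if_neg hmod]
        rw [ih (i + 1) (by omega) (by omega)]
        have hnd : ¬ (i ∣ x) := fun hd => hmod ((PySem.Int.mod_eq_zero_iff_dvd x i).mpr hd)
        rw [← pvTouch_step x i g hx (Or.inl hnd)]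
    · rw [pvDivLoop, dif_neg hlt]
      rw [if_neg (fun ht => hlt (pvTouch_sq x i g hx hi ht))]

theorem pvDivLoop_getD_one (x : Int) (hx : 0 < x) (d : PySem.Dict Int Int) (g : Int) :
    (pvDivLoop x 1 d).getD g 0
      = if decide (g ∣ x) && decide (1 ≤ g) then max (d.getD g 0) x else d.getD g 0 := by
  rw [pvDivLoop_getD x hx (x + 1 - 1).toNat 1 le_rfl le_rfl, pvTouch_one x g hx]

-- nodup keys and positive values are preserved by the divisor loop
theorem pvDivLoop_inv (x : Int) (hx : 0 < x) : ∀ (n : Nat) (i : Int), (x + 1 - i).toNat ≤ n →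
    ∀ (d : PySem.Dict Int Int), d.keys.Nodup → (∀ g m, d.get? g = some m → 0 < m) →
    (pvDivLoop x i d).keys.Nodup ∧ (∀ g m, (pvDivLoop x i d).get? g = some m → 0 < m) := by
  intro n
  induction n with
  | zero =>
    intro i h d hnd hpos
    have hstop : ¬ i * i ≤ x := by
      intro hlt
      have := pvIleX i x hlt
      omega
    rw [pvDivLoop, dif_neg hstop]
    exact ⟨hnd, hpos⟩
  | succ n ih =>
    intro i h d hnd hpos
    by_cases hlt : i * i ≤ x
    · have hile : i ≤ x := pvIleX i x hlt
      rw [pvDivLoop, dif_pos hlt]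
      dsimp only
      have hstep : ∀ (d' : PySem.Dict Int Int) (k : Int), d'.keys.Nodup → (∀ g m, d'.get? g = some m → 0 < m) →
          (if d'.getD k 0 < x then d'.insert k x else d').keys.Nodup ∧
          (∀ g m, (if d'.getD k 0 < x then d'.insert k x else d').get? g = some m → 0 < m) := by
        intro d' k hnd' hpos'
        split_ifs with hc
        · refine ⟨PySem.Dict.nodup_keys_insert d' k x hnd', ?_⟩
          intro g m hg
          rw [PySem.Dict.get?_insert] at hg
          split_ifs at hg with hgk
          · cases hg; omega
          · exact hpos' g m hg
        · exact ⟨hnd', hpos'⟩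
      by_cases hmod : PySem.Int.mod x i = 0
      · rw [if_pos hmod]
        obtain ⟨h1, h2⟩ := hstep d i hnd hpos
        obtain ⟨h3, h4⟩ := hstep _ (PySem.Int.floordiv x i) h1 h2
        exact ih (i + 1) (by omega) _ h3 h4
      · rw [if_neg hmod]
        exact ih (i + 1) (by omega) d hnd hpos
    · rw [pvDivLoop, dif_neg hlt]
      exact ⟨hnd, hpos⟩

-- ----- the per-list fold: getD is a running conditional maximum -----

theorem pvFoldDiv_getD (xs : List Int) : ∀ (d : PySem.Dict Int Int) (g : Int), (∀ y ∈ xs, 0 < y) →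
    (xs.foldl (fun d x => pvDivLoop x 1 d) d).getD g 0
      = xs.foldl (fun m x => if decide (g ∣ x) && decide (1 ≤ g) then max m x else m) (d.getD g 0) := by
  induction xs with
  | nil => intro d g _; rfl
  | cons x t ih =>
    intro d g hpos
    simp only [List.foldl_cons]
    rw [ih _ g (fun y hy => hpos y (List.mem_cons_of_mem x hy))]
    rw [pvDivLoop_getD_one x (hpos x List.mem_cons_self) d g]

theorem pvCondMax_init_le (g : Int) (xs : List Int) (init : Int) :
    init ≤ xs.foldl (fun m x => if decide (g ∣ x) && decide (1 ≤ g) then max m x else m) init := by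
  induction xs generalizing init with
  | nil => exact le_rfl
  | cons x t ih =>
    simp only [List.foldl_cons]
    refine le_trans ?_ (ih _)
    split_ifs <;> omega

theorem pvCondMax_ge (g : Int) (xs : List Int) (init x : Int) (hx : x ∈ xs)
    (hdvd : g ∣ x) (hg : 1 ≤ g) :
    x ≤ xs.foldl (fun m x => if decide (g ∣ x) && decide (1 ≤ g) then max m x else m) init := by
  induction xs generalizing init with
  | nil => cases hx
  | cons y t ih =>
    simp only [List.foldl_cons]
    rcases List.mem_cons.mp hx with h | h
    · subst h
      refine le_trans ?_ (pvCondMax_init_le g t _)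
      rw [if_pos (by simp [hdvd, hg])]
      omega
    · exact ih _ h

theorem pvCondMax_cases (g : Int) (xs : List Int) (init : Int) :
    xs.foldl (fun m x => if decide (g ∣ x) && decide (1 ≤ g) then max m x else m) init = init ∨
      ∃ x ∈ xs, g ∣ x ∧ 1 ≤ g ∧
        xs.foldl (fun m x => if decide (g ∣ x) && decide (1 ≤ g) then max m x else m) init = x := by
  induction xs generalizing init with
  | nil => left; rfl
  | cons y t ih =>
    simp only [List.foldl_cons]
    rcases ih (if decide (g ∣ y) && decide (1 ≤ g) then max init y else init) with h | h
    · rw [h]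
      split_ifs at h ⊢ with hc
      · simp only [Bool.and_eq_true, decide_eq_true_eq] at hc
        rcases max_choice init y with hm | hm
        · left; omega
        · right; exact ⟨y, List.mem_cons_self, hc.1, hc.2, by omega⟩
      · left; rfl
    · obtain ⟨x, hx, h1, h2, h3⟩ := h
      right; exact ⟨x, List.mem_cons_of_mem y hx, h1, h2, h3⟩

-- ----- pvDivisorMax: the three facts the assembly needs -----

theorem pvDivisorMax_ge (xs : List Int) (hpos : ∀ y ∈ xs, 0 < y) (x g : Int)
    (hx : x ∈ xs) (hdvd : g ∣ x) (hg : 1 ≤ g) :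
    x ≤ (pvDivisorMax xs).getD g 0 := by
  unfold pvDivisorMax
  rw [pvFoldDiv_getD xs PySem.Dict.empty g hpos, PySem.Dict.getD_empty]
  exact pvCondMax_ge g xs 0 x hx hdvd hg

theorem pvFoldDiv_inv (xs : List Int) : ∀ d : PySem.Dict Int Int, (∀ y ∈ xs, 0 < y) →
    d.keys.Nodup → (∀ g m, d.get? g = some m → 0 < m) →
    (xs.foldl (fun d x => pvDivLoop x 1 d) d).keys.Nodup ∧
      (∀ g m, (xs.foldl (fun d x => pvDivLoop x 1 d) d).get? g = some m → 0 < m) := by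
  induction xs with
  | nil => intro d _ h1 h2; exact ⟨h1, h2⟩
  | cons x t ih =>
    intro d hpos h1 h2
    simp only [List.foldl_cons]
    obtain ⟨h3, h4⟩ := pvDivLoop_inv x (hpos x List.mem_cons_self) (x + 1 - 1).toNat 1 le_rfl d h1 h2
    exact ih _ (fun y hy => hpos y (List.mem_cons_of_mem x hy)) h3 h4

theorem pvDivisorMax_nodup (xs : List Int) (hpos : ∀ y ∈ xs, 0 < y) :
    (pvDivisorMax xs).keys.Nodup ∧ (∀ g m, (pvDivisorMax xs).get? g = some m → 0 < m) := by
  unfold pvDivisorMax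
  exact pvFoldDiv_inv xs PySem.Dict.empty hpos PySem.Dict.nodup_keys_empty
    (fun g m hg => by rw [PySem.Dict.get?_empty] at hg; cases hg)

theorem pvDivisorMax_sound (xs : List Int) (hpos : ∀ y ∈ xs, 0 < y) (g m : Int)
    (hit : (g, m) ∈ (pvDivisorMax xs).items) :
    m ∈ xs ∧ g ∣ m ∧ 1 ≤ g := by
  obtain ⟨hnd, hposv⟩ := pvDivisorMax_nodup xs hpos
  have hget : (pvDivisorMax xs).get? g = some m := PySem.Dict.get?_of_mem_items _ hit hnd
  have hm0 : 0 < m := hposv g m hget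
  have hgd : (pvDivisorMax xs).getD g 0 = m := PySem.Dict.getD_of_get?_eq_some _ 0 hget
  unfold pvDivisorMax at hgd
  rw [pvFoldDiv_getD xs PySem.Dict.empty g hpos, PySem.Dict.getD_empty] at hgd
  rcases pvCondMax_cases g xs 0 with h | ⟨x, hx, h1, h2, h3⟩
  · omega
  · rw [h3] at hgd
    exact ⟨hgd ▸ hx, hgd ▸ h1, h2⟩

-- ----- B-side normalization: the alt port is a pvMax2 fold over a candidate list -----

def pvPos (L : List Int) : List Int := PySem.Set.ofList (L.filter (fun x => decide (0 < x)))

def pvMaxPos (L : List Int) : Int := (PySem.List.max? (pvPos L) (fun y => y)).getD 0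

def pvCands (dA dB : PySem.Dict Int Int) : List (Int × Int) :=
  dA.items.filterMap (fun p => (dB.get? p.1).map (fun mb => (p.1, p.2 + mb)))

def pvCandList (A B : List Int) : List (Int × Int) :=
  pvCands (pvDivisorMax (pvPos A)) (pvDivisorMax (pvPos B))
    ++ (if (0 : Int) ∈ A ∧ pvPos B ≠ [] then [(pvMaxPos B, pvMaxPos B)] else [])
    ++ (if (0 : Int) ∈ B ∧ pvPos A ≠ [] then [(pvMaxPos A, pvMaxPos A)] else [])

theorem pvItemsFold (dB : PySem.Dict Int Int) (items : List (Int × Int)) (z : Int × Int) :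
    items.foldl (fun best p =>
      match dB.get? p.1 with
      | some mb =>
          if p.1 > best.1 ∨ (p.1 = best.1 ∧ p.2 + mb > best.2) then (p.1, p.2 + mb) else best
      | none => best) z
    = (items.filterMap (fun p => (dB.get? p.1).map (fun mb => (p.1, p.2 + mb)))).foldl pvMax2 z := by
  induction items generalizing z with
  | nil => rfl
  | cons p t ih =>
    simp only [List.foldl_cons, List.filterMap_cons]
    cases hm : dB.get? p.1 with
    | none => exact ih z
    | some mb =>
      simp only [Option.map_some, List.foldl_cons]
      exact ih (pvMax2 z (p.1, p.2 + mb))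

theorem pvOptStep (c : Prop) [Decidable c] (z : Int × Int) (v : Int) :
    (if c then (if v > z.1 ∨ (v = z.1 ∧ v > z.2) then (v, v) else z) else z)
      = (if c then [(v, v)] else []).foldl pvMax2 z := by
  by_cases hc : c
  · rw [if_pos hc, if_pos hc]
    simp only [List.foldl_cons, List.foldl_nil]
    rfl
  · rw [if_neg hc, if_neg hc]
    rfl

theorem pvB_eq (A B : List Int) :
    maximum_gcd_sum_brute_alt A B = ((pvCandList A B).foldl pvMax2 ((0 : Int), (0 : Int))).2 := by
  unfold maximum_gcd_sum_brute_alt pvCandList pvCands pvMaxPos pvPos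
  dsimp only
  rw [pvItemsFold]
  rw [pvOptStep, pvOptStep]
  rw [List.foldl_append, List.foldl_append]

-- ----- small bridging facts -----

theorem pvPosMem {L : List Int} {v : Int} (h : v ∈ pvPos L) : v ∈ L ∧ 0 < v := by
  unfold pvPos at h
  rw [PySem.Set.mem_ofList] at h
  have h2 := List.mem_filter.mp h
  simpa using h2

theorem pvPosMem' {L : List Int} {v : Int} (hv : v ∈ L) (hpos : 0 < v) : v ∈ pvPos L := by
  unfold pvPos
  rw [PySem.Set.mem_ofList]
  exact List.mem_filter.mpr ⟨hv, by simpa using hpos⟩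

theorem pvGetSome (d : PySem.Dict Int Int) (g a : Int) (ha : 0 < a) (hge : a ≤ d.getD g 0) :
    d.get? g = some (d.getD g 0) := by
  cases hg : d.get? g with
  | none =>
    rw [PySem.Dict.getD_eq_get?_getD, hg] at hge
    simp at hge; omega
  | some v =>
    rw [PySem.Dict.getD_eq_get?_getD, hg]
    rfl

theorem pvGcdPos (a b : Int) (ha : 0 < a) : 0 < (Int.gcd a b : Int) := by
  have h : Int.gcd a b ≠ 0 := by
    rw [Ne, Int.gcd_eq_zero_iff]
    intro ⟨h1, _⟩; omega
  exact_mod_cast Nat.pos_of_ne_zero h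

theorem pvLeGcd (g ma mb : Int) (hg : 1 ≤ g) (h1 : g ∣ ma) (h2 : g ∣ mb) (hma : 0 < ma) :
    g ≤ (Int.gcd ma mb : Int) := by
  have hgn : ((g.toNat : Int)) = g := Int.toNat_of_nonneg (by omega)
  have hd : g.toNat ∣ Int.gcd ma mb := Int.dvd_gcd (by rw [hgn]; exact h1) (by rw [hgn]; exact h2)
  have hpos : 0 < Int.gcd ma mb := by
    have := pvGcdPos ma mb hma
    omega
  have hle := Nat.le_of_dvd hpos hd
  omega

theorem pyGcd_zero_left (b : Int) (hb : 0 ≤ b) : pyGcd 0 b = b := by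
  rw [pyGcd_eq_gcd 0 b le_rfl hb, Int.gcd_zero_left, Int.natAbs_of_nonneg hb]

theorem pyGcd_zero_right (a : Int) (ha : 0 ≤ a) : pyGcd a 0 = a := by
  rw [pyGcd_eq_gcd a 0 ha le_rfl, Int.gcd_zero_right, Int.natAbs_of_nonneg ha]

theorem pvPairs_mem {A B : List Int} {a b : Int} (ha : a ∈ A) (hb : b ∈ B) :
    (pyGcd a b, a + b) ∈ pvPairs A B := by
  unfold pvPairs
  rw [List.mem_flatMap]
  exact ⟨a, ha, List.mem_map.mpr ⟨b, hb, rfl⟩⟩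

theorem pvPairs_elim {A B : List Int} {x : Int × Int} (hx : x ∈ pvPairs A B) :
    ∃ a ∈ A, ∃ b ∈ B, x = (pyGcd a b, a + b) := by
  unfold pvPairs at hx
  rw [List.mem_flatMap] at hx
  obtain ⟨a, ha, hmem⟩ := hx
  obtain ⟨b, hb, rfl⟩ := List.mem_map.mp hmem
  exact ⟨a, ha, b, hb, rfl⟩

theorem pvMaxPos_spec {L : List Int} (hne : pvPos L ≠ []) :
    pvMaxPos L ∈ pvPos L ∧ ∀ y ∈ pvPos L, y ≤ pvMaxPos L := by
  unfold pvMaxPos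
  cases hm : PySem.List.max? (pvPos L) (fun y => y) with
  | none => exact absurd ((PySem.List.max?_eq_none_iff _ _).mp hm) hne
  | some m =>
    refine ⟨PySem.List.max?_mem hm, ?_⟩
    intro y hy
    exact PySem.List.max?_isMax hm y hy

-- one dominating candidate for a positive pair (a, b)
theorem pvPosPairDominated {A B : List Int} {a b : Int} (ha : a ∈ A) (hb : b ∈ B)
    (ha0 : 0 < a) (hb0 : 0 < b) :
    ∃ y ∈ pvCands (pvDivisorMax (pvPos A)) (pvDivisorMax (pvPos B)),
      pvLe2 (pyGcd a b, a + b) y := by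
  set G : Int := (Int.gcd a b : Int) with hGdef
  have hG0 : 0 < G := pvGcdPos a b ha0
  have hGa : G ∣ a := Int.gcd_dvd_left a b
  have hGb : G ∣ b := Int.gcd_dvd_right a b
  have hposA : ∀ y ∈ pvPos A, 0 < y := fun y hy => (pvPosMem hy).2
  have hposB : ∀ y ∈ pvPos B, 0 < y := fun y hy => (pvPosMem hy).2
  have hma : a ≤ (pvDivisorMax (pvPos A)).getD G 0 :=
    pvDivisorMax_ge (pvPos A) hposA a G (pvPosMem' ha ha0) hGa (by omega)
  have hmb : b ≤ (pvDivisorMax (pvPos B)).getD G 0 :=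
    pvDivisorMax_ge (pvPos B) hposB b G (pvPosMem' hb hb0) hGb (by omega)
  have hgA := pvGetSome _ G a ha0 hma
  have hgB := pvGetSome _ G b hb0 hmb
  refine ⟨(G, (pvDivisorMax (pvPos A)).getD G 0 + (pvDivisorMax (pvPos B)).getD G 0), ?_, ?_⟩
  · unfold pvCands
    rw [List.mem_filterMap]
    exact ⟨(G, (pvDivisorMax (pvPos A)).getD G 0), PySem.Dict.mem_items_of_get?_eq_some _ hgA,
      by rw [hgB]; rfl⟩
  · have hpg : pyGcd a b = G := pyGcd_eq_gcd a b (by omega) (by omega)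
    unfold pvLe2
    rw [hpg]
    exact Or.inr ⟨rfl, by omega⟩

-- y ∈ cands is dominated by a genuine pair of positive elements
theorem pvCandDominated {A B : List Int} {y : Int × Int}
    (hy : y ∈ pvCands (pvDivisorMax (pvPos A)) (pvDivisorMax (pvPos B))) :
    ∃ x ∈ pvPairs A B, pvLe2 y x := by
  have hposA : ∀ z ∈ pvPos A, 0 < z := fun z hz => (pvPosMem hz).2
  have hposB : ∀ z ∈ pvPos B, 0 < z := fun z hz => (pvPosMem hz).2
  unfold pvCands at hy
  rw [List.mem_filterMap] at hy
  obtain ⟨p, hit, hmapeq⟩ := hy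
  obtain ⟨g, ma⟩ := p
  rw [Option.map_eq_some_iff] at hmapeq
  obtain ⟨mb, hm, hyeq⟩ := hmapeq
  obtain ⟨hmaA, hdvdA, hg1⟩ := pvDivisorMax_sound (pvPos A) hposA g ma hit
  have hitB := PySem.Dict.mem_items_of_get?_eq_some _ hm
  obtain ⟨hmbB, hdvdB, _⟩ := pvDivisorMax_sound (pvPos B) hposB g mb hitB
  obtain ⟨hmaA', hma0⟩ := pvPosMem hmaA
  obtain ⟨hmbB', hmb0⟩ := pvPosMem hmbB
  refine ⟨(pyGcd ma mb, ma + mb), pvPairs_mem hmaA' hmbB', ?_⟩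
  have hpg : pyGcd ma mb = (Int.gcd ma mb : Int) := pyGcd_eq_gcd ma mb (by omega) (by omega)
  have hle := pvLeGcd g ma mb hg1 hdvdA hdvdB hma0
  rw [← hyeq]
  unfold pvLe2
  dsimp only
  rw [hpg]
  omega

-- ===== VERDICT (by name: the statement is the Claim_ definition above) =====
theorem maximum_gcd_sum_brute_spec : Claim_equal_maximum_gcd_sum_brute := by
  unfold Claim_equal_maximum_gcd_sum_brute
  intro A B _
  unfold Spec_maximum_gcd_sum_brute
  rw [pvA_eq, pvB_eq]
  suffices h : (pvPairs A B).foldl pvMax2 ((0 : Int), (0 : Int))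
      = (pvCandList A B).foldl pvMax2 ((0 : Int), (0 : Int)) by rw [h]
  apply pvFold_eq
  · -- every genuine pair is dominated by a candidate (or by the seed)
    intro x hx
    obtain ⟨a, ha, b, hb, rfl⟩ := pvPairs_elim hx
    by_cases hneg : a < 0 ∨ b < 0
    · refine ⟨((0 : Int), (0 : Int)), Or.inl rfl, ?_⟩
      have hlt := pyGcd_neg a b hneg
      unfold pvLe2
      dsimp only
      omega
    · have ha0 : 0 ≤ a := by omega
      have hb0 : 0 ≤ b := by omega
      rcases (by omega : a = 0 ∨ 0 < a) with haz | hap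
      · subst haz
        rcases (by omega : b = 0 ∨ 0 < b) with hbz | hbp
        · subst hbz
          refine ⟨((0 : Int), (0 : Int)), Or.inl rfl, ?_⟩
          have h00 : pyGcd 0 0 = 0 := pyGcd_zero_left 0 le_rfl
          unfold pvLe2
          dsimp only
          omega
        · have hbB : b ∈ pvPos B := pvPosMem' hb hbp
          have hne : pvPos B ≠ [] := List.ne_nil_of_mem hbB
          obtain ⟨hmm, hmax⟩ := pvMaxPos_spec hne
          refine ⟨(pvMaxPos B, pvMaxPos B), ?_, ?_⟩
          · right
            unfold pvCandList
            simp only [List.mem_append]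
            left; right
            rw [if_pos ⟨ha, hne⟩]
            exact List.mem_singleton.mpr rfl
          · have hble := hmax b hbB
            have hpg : pyGcd 0 b = b := pyGcd_zero_left b hb0
            unfold pvLe2
            dsimp only
            omega
      · rcases (by omega : b = 0 ∨ 0 < b) with hbz | hbp
        · subst hbz
          have haA : a ∈ pvPos A := pvPosMem' ha hap
          have hne : pvPos A ≠ [] := List.ne_nil_of_mem haA
          obtain ⟨hmm, hmax⟩ := pvMaxPos_spec hne
          refine ⟨(pvMaxPos A, pvMaxPos A), ?_, ?_⟩
          · right
            unfold pvCandList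
            simp only [List.mem_append]
            right
            rw [if_pos ⟨hb, hne⟩]
            exact List.mem_singleton.mpr rfl
          · have hale := hmax a haA
            have hpg : pyGcd a 0 = a := pyGcd_zero_right a ha0
            unfold pvLe2
            dsimp only
            omega
        · obtain ⟨y, hy, hle⟩ := pvPosPairDominated ha hb hap hbp
          refine ⟨y, Or.inr ?_, hle⟩
          unfold pvCandList
          simp only [List.mem_append]
          left; left
          exact hy
  · -- every candidate is dominated by a genuine pair (or by the seed)
    intro y hy
    unfold pvCandList at hy
    simp only [List.mem_append] at hy
    rcases hy with (hy | hy) | hy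
    · obtain ⟨x, hx, hle⟩ := pvCandDominated hy
      exact ⟨x, Or.inr hx, hle⟩
    · by_cases hc : (0 : Int) ∈ A ∧ pvPos B ≠ []
      · rw [if_pos hc] at hy
        have hyeq := List.mem_singleton.mp hy
        subst hyeq
        obtain ⟨hmm, _⟩ := pvMaxPos_spec hc.2
        obtain ⟨hmB, hm0⟩ := pvPosMem hmm
        refine ⟨(pyGcd 0 (pvMaxPos B), 0 + pvMaxPos B), Or.inr (pvPairs_mem hc.1 hmB), ?_⟩
        have hpg : pyGcd 0 (pvMaxPos B) = pvMaxPos B := pyGcd_zero_left _ (by omega)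
        unfold pvLe2
        dsimp only
        omega
      · rw [if_neg hc] at hy
        cases hy
    · by_cases hc : (0 : Int) ∈ B ∧ pvPos A ≠ []
      · rw [if_pos hc] at hy
        have hyeq := List.mem_singleton.mp hy
        subst hyeq
        obtain ⟨hmm, _⟩ := pvMaxPos_spec hc.2
        obtain ⟨hmA, hm0⟩ := pvPosMem hmm
        refine ⟨(pyGcd (pvMaxPos A) 0, pvMaxPos A + 0), Or.inr (pvPairs_mem hmA hc.1), ?_⟩
        have hpg : pyGcd (pvMaxPos A) 0 = pvMaxPos A := pyGcd_zero_right _ (by omega)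
        unfold pvLe2
        dsimp only
        omega
      · rw [if_neg hc] at hy
        cases hy
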